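-- pv_equiv track=rewrite | github.com/al-osokin/rueo_global | backend/app/parsing/parser_v3/normalization.py | _expand_pattern
-- ===== SOURCE A (Python) =====
-- from typing import Any, Dict, Iterable, List, Optional, Tuple
--
-- def _expand_pattern(pattern: str) -> List[str]:
--     cleaned = pattern
--
--     def recurse(index: int) -> Tuple[List[str], int]:
--         results = [""]
--         i = index
--         while i < len(cleaned):
--             char = cleaned[i]
--             if char == '(':
--                 inner, new_index = recurse(i + 1)
--                 updated: List[str] = []
--                 for current in results:
--                     updated.append(current)
--                     for addition in inner:
--                         updated.append(current + addition)
--                 results = updated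
--                 i = new_index
--             elif char == ')':
--                 return results, i + 1
--             else:
--                 j = i
--                 while j < len(cleaned) and cleaned[j] not in '()':
--                     j += 1
--                 literal = cleaned[i:j]
--                 results = [current + literal for current in results]
--                 i = j
--                 continue
--         return results, i
--
--     expanded, _ = recurse(0)
--     return _unique_preserve_order([item for item in expanded if item])
--
-- def _unique_preserve_order(items: Iterable[str]) -> List[str]:
--     seen: set = set()
--     result: List[str] = []
--     for item in items:
--         if item in seen:
--             continue
--         seen.add(item)
--         result.append(item)
--     return result
-- ===== SOURCE B (Python) =====
-- from typing import List
--
--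
-- def _expand_pattern(pattern: str) -> List[str]:
--     # Iterative single pass with an explicit stack of frames (top = last).
--     stack: List[List[str]] = [[""]]
--     for pos, char in enumerate(pattern):
--         if char == '(':
--             stack.append([""])
--         elif char == ')':
--             if len(stack) == 1:
--                 # unmatched ')' at top level: stop scanning (rest is ignored)
--                 break
--             inner = stack.pop()
--             stack[-1] = [p + add for p in stack[-1] for add in [""] + inner]
--         else:
--             stack[-1] = [p + char for p in stack[-1]]
--     # unclosed groups: fold remaining frames into their parents
--     while len(stack) > 1:
--         inner = stack.pop()
--         stack[-1] = [p + add for p in stack[-1] for add in [""] + inner]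
--     out: List[str] = []
--     for item in stack[0]:
--         if item and item not in out:
--             out.append(item)
--     return out
-- ===== Notes on version B (the rewrite author's own statement) =====
-- stated objective: alternative
-- what changed: Replaces A's nested recursive-descent helper (which returns partial results plus a resume index and token-scans literal runs) by a single iterative per-character pass over an explicit stack of frames, folding the top frame into its parent when a group closes and collapsing leftover frames at the end; the seen-set dedupe becomes a fused filter-plus-first-occurrence loop.
import Mathlib
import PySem

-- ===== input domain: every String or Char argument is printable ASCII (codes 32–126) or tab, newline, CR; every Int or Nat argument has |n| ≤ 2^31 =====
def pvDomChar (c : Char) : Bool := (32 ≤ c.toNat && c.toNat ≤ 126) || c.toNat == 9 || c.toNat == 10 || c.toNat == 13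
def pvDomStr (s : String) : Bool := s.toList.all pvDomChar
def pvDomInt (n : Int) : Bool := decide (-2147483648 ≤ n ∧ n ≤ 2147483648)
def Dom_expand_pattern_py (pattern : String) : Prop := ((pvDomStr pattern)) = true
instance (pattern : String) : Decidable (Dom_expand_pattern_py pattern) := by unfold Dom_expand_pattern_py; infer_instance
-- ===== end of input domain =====

-- B replaces A's recursive token-scanning parser by an iterative per-character pass
-- over an explicit stack of frames (objective: alternative decomposition, same cost).

-- ===== PORT A =====
-- the inner double loop 'for current in results: append current; for addition in inner: append current+addition'
def pyFoldGroupA (results inner : List (List Char)) : List (List Char) :=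
  results.foldl
    (fun updated current =>
      inner.foldl (fun acc addition => acc ++ [current ++ addition]) (updated ++ [current]))
    []

-- the nested 'recurse' of A, on the character-list suffix (index i ↦ suffix), fuelled;
-- fuel = length of the whole string always suffices (each step consumes ≥ 1 character)
def pyRecurseA (fuel : Nat) (cs : List Char) (results : List (List Char)) :
    List (List Char) × List Char :=
  match fuel, cs with
  | _, [] => (results, [])
  | 0, cs => (results, cs)
  | fuel + 1, c :: rest =>
    if c = '(' then
      let r := pyRecurseA fuel rest [[]]
      pyRecurseA fuel r.2 (pyFoldGroupA results r.1)
    else if c = ')' then (results, rest)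
    else
      -- inner 'while j < len and cleaned[j] not in "()"' scan + slice cleaned[i:j]
      let tok := (c :: rest).takeWhile (fun ch => ¬ (ch = '(' ∨ ch = ')'))
      let rest2 := (c :: rest).dropWhile (fun ch => ¬ (ch = '(' ∨ ch = ')'))
      pyRecurseA fuel rest2 (results.map (· ++ tok))

-- _unique_preserve_order: seen-set + result-list loop
def pyUniqueA (items : List String) : List String :=
  (items.foldl
    (fun (st : PySem.Set String × List String) item =>
      if PySem.Set.contains st.1 item then st
      else (PySem.Set.add st.1 item, st.2 ++ [item]))
    (PySem.Set.empty, [])).2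

def expand_pattern_py (pattern : String) : List String :=
  let cs := pattern.toList
  let expanded := (pyRecurseA cs.length cs [[]]).1
  pyUniqueA ((expanded.map String.ofList).filter (fun item => item ≠ ""))

-- ===== PORT B =====
-- close a group: [p + add for p in parent for add in [""] + inner]
def foldGroupB (parent inner : List (List Char)) : List (List Char) :=
  parent.flatMap (fun p => ([] :: inner).map (fun a => p ++ a))

-- the single pass: stack of frames, kept as (top frame, rest of stack)
def runB : List Char → List (List Char) → List (List (List Char)) →
    List (List Char) × List (List (List Char))
  | [], top, tl => (top, tl)
  | c :: rest, top, tl =>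
    if c = '(' then runB rest [[]] (top :: tl)
    else if c = ')' then
      match tl with
      | [] => (top, [])                      -- unmatched ')': stop scanning
      | parent :: tl' => runB rest (foldGroupB parent top) tl'
    else runB rest (top.map (· ++ [c])) tl

-- fold the remaining (unclosed) frames into their parents
def collapseB : List (List Char) → List (List (List Char)) → List (List Char)
  | top, [] => top
  | top, parent :: tl => collapseB (foldGroupB parent top) tl

-- final loop: keep nonempty, first occurrence only
def pyUniqueB (items : List String) : List String :=
  items.foldl (fun out item => if item ≠ "" ∧ item ∉ out then out ++ [item] else out) []

def expand_pattern_py_alt (pattern : String) : List String :=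
  let r := runB pattern.toList [[]] []
  pyUniqueB ((collapseB r.1 r.2).map String.ofList)

-- ===== PRECONDITION & SPEC =====
def Spec_expand_pattern_py (pattern : String) (out : List String) : Prop := out = expand_pattern_py_alt pattern
instance (pattern : String) (out : List String) : Decidable (Spec_expand_pattern_py pattern out) := by unfold Spec_expand_pattern_py; infer_instance

-- ===== CLAIM (what is proved, stated in full; the proofs are below) =====
def Claim_equal_expand_pattern_py : Prop := ∀ (pattern : String), Dom_expand_pattern_py pattern → Spec_expand_pattern_py pattern (expand_pattern_py pattern)

-- ===== LEMMAS AND PROOFS =====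

theorem innerFold (inner : List (List Char)) : ∀ (init : List (List Char)) (c : List Char),
    inner.foldl (fun acc addition => acc ++ [c ++ addition]) init
      = init ++ inner.map (fun addition => c ++ addition) := by
  induction inner with
  | nil => simp
  | cons a t ih => intro init c; simp [List.foldl_cons, ih]

theorem foldGroupA_aux (inner : List (List Char)) (results : List (List Char)) :
    ∀ (acc : List (List Char)),
    results.foldl
      (fun updated current =>
        inner.foldl (fun a addition => a ++ [current ++ addition]) (updated ++ [current]))
      acc
      = acc ++ results.flatMap (fun p => ([] :: inner).map (fun a => p ++ a)) := by
  induction results with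
  | nil => simp
  | cons p t ih =>
    intro acc
    simp only [List.foldl_cons, List.flatMap_cons, List.map_cons]
    rw [innerFold, ih]
    simp

theorem foldGroupA_eq_B (results inner : List (List Char)) :
    pyFoldGroupA results inner = foldGroupB results inner := by
  unfold pyFoldGroupA foldGroupB
  rw [foldGroupA_aux]
  simp

theorem len_recA (fuel : Nat) : ∀ (cs : List Char) (r : List (List Char)),
    (pyRecurseA fuel cs r).2.length ≤ cs.length := by
  induction fuel with
  | zero => intro cs r; cases cs <;> simp [pyRecurseA]
  | succ f ih =>
    intro cs r
    cases cs with
    | nil => simp [pyRecurseA]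
    | cons c rest =>
      simp only [pyRecurseA]
      split_ifs with h1 h2
      · calc (pyRecurseA f (pyRecurseA f rest [[]]).2 (pyFoldGroupA r (pyRecurseA f rest [[]]).1)).2.length
            ≤ (pyRecurseA f rest [[]]).2.length := ih _ _
          _ ≤ rest.length := ih _ _
          _ ≤ (c :: rest).length := by simp
      · simp
      · calc (pyRecurseA f ((c :: rest).dropWhile fun ch => ¬ (ch = '(' ∨ ch = ')'))
              (r.map (· ++ (c :: rest).takeWhile fun ch => ¬ (ch = '(' ∨ ch = ')')))).2.length
            ≤ ((c :: rest).dropWhile fun ch => ¬ (ch = '(' ∨ ch = ')')).length := ih _ _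
          _ ≤ (c :: rest).length := List.length_dropWhile_le _ _

theorem runB_token (tok : List Char) (h : ∀ ch ∈ tok, ¬ (ch = '(' ∨ ch = ')')) :
    ∀ (rest : List Char) (r : List (List Char)) (S : List (List (List Char))),
    runB (tok ++ rest) r S = runB rest (r.map (· ++ tok)) S := by
  induction tok with
  | nil => intro rest r S; simp
  | cons ch t ih =>
    intro rest r S
    have hch := h ch (by simp)
    have h1 : ch ≠ '(' := fun e => hch (Or.inl e)
    have h2 : ch ≠ ')' := fun e => hch (Or.inr e)
    simp only [List.cons_append, runB, if_neg h1, if_neg h2]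
    rw [ih (fun x hx => h x (by simp [hx]))]
    simp [List.map_map, Function.comp_def, List.append_assoc]

theorem main_lemma (fuel : Nat) : ∀ (cs : List Char), cs.length ≤ fuel →
    ∀ (r : List (List Char)) (S : List (List (List Char))),
    collapseB (runB cs r S).1 (runB cs r S).2 =
      (match S with
       | [] => (pyRecurseA fuel cs r).1
       | p :: tl =>
         collapseB
           (runB (pyRecurseA fuel cs r).2 (foldGroupB p (pyRecurseA fuel cs r).1) tl).1
           (runB (pyRecurseA fuel cs r).2 (foldGroupB p (pyRecurseA fuel cs r).1) tl).2) := by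
  induction fuel with
  | zero =>
    intro cs hlen r S
    have : cs = [] := by cases cs <;> simp_all
    subst this
    cases S <;> simp [runB, pyRecurseA, collapseB]
  | succ f ih =>
    intro cs hlen r S
    cases cs with
    | nil => cases S <;> simp [runB, pyRecurseA, collapseB]
    | cons c rest =>
      by_cases h1 : c = '('
      · subst h1
        have hrest : rest.length ≤ f := by simpa using hlen
        have hlen1 : (pyRecurseA f rest [[]]).2.length ≤ f :=
          le_trans (len_recA f rest [[]]) hrest
        have e1 : runB ('(' :: rest) r S = runB rest [[]] (r :: S) := by simp [runB]
        have e2 : pyRecurseA (f + 1) ('(' :: rest) r =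
            pyRecurseA f (pyRecurseA f rest [[]]).2
              (foldGroupB r (pyRecurseA f rest [[]]).1) := by
          simp [pyRecurseA, foldGroupA_eq_B]
        rw [e1, ih rest hrest [[]] (r :: S), e2]
        exact ih (pyRecurseA f rest [[]]).2 hlen1
          (foldGroupB r (pyRecurseA f rest [[]]).1) S
      · by_cases h2 : c = ')'
        · subst h2
          have e2 : pyRecurseA (f + 1) (')' :: rest) r = (r, rest) := by
            simp [pyRecurseA]
          cases S with
          | nil =>
            have e1 : runB (')' :: rest) r [] = (r, []) := by simp [runB]
            rw [e1, e2]
            simp [collapseB]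
          | cons p tl =>
            have e1 : runB (')' :: rest) r (p :: tl) = runB rest (foldGroupB p r) tl := by
              simp [runB]
            rw [e1, e2]
        · -- literal characters
          have hq : ∀ ch ∈ (c :: rest).takeWhile (fun ch => ¬ (ch = '(' ∨ ch = ')')),
              ¬ (ch = '(' ∨ ch = ')') := by
            intro ch hch
            have := List.mem_takeWhile_imp hch
            simpa using this
          have hsplit : (c :: rest) =
              ((c :: rest).takeWhile (fun ch => ¬ (ch = '(' ∨ ch = ')'))) ++
              ((c :: rest).dropWhile (fun ch => ¬ (ch = '(' ∨ ch = ')'))) := by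
            simp [List.takeWhile_append_dropWhile]
          have hc : (fun ch => decide (¬ (ch = '(' ∨ ch = ')'))) c = true := by
            simp [h1, h2]
          have hdrop : ((c :: rest).dropWhile (fun ch => ¬ (ch = '(' ∨ ch = ')'))).length ≤ f := by
            rw [show (c :: rest).dropWhile (fun ch => ¬ (ch = '(' ∨ ch = ')'))
                = rest.dropWhile (fun ch => ¬ (ch = '(' ∨ ch = ')')) from by
              simp [h1, h2]]
            exact le_trans (List.length_dropWhile_le _ _) (by simpa using hlen)
          have e2 : pyRecurseA (f + 1) (c :: rest) r =
              pyRecurseA f ((c :: rest).dropWhile (fun ch => ¬ (ch = '(' ∨ ch = ')')))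
                (r.map (· ++ (c :: rest).takeWhile (fun ch => ¬ (ch = '(' ∨ ch = ')')))) := by
            simp [pyRecurseA, h1, h2]
          conv_lhs => rw [hsplit]
          rw [runB_token _ hq, e2]
          exact ih _ hdrop (r.map (· ++ (c :: rest).takeWhile (fun ch => ¬ (ch = '(' ∨ ch = ')')))) S

theorem unique_aux (items : List String) :
    ∀ (seen : PySem.Set String) (res : List String),
    (∀ x, PySem.Set.contains seen x = true ↔ x ∈ res) →
    ((items.filter (fun item => item ≠ "")).foldl
      (fun (st : PySem.Set String × List String) item =>
        if PySem.Set.contains st.1 item then st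
        else (PySem.Set.add st.1 item, st.2 ++ [item]))
      (seen, res)).2
      = items.foldl (fun out item => if item ≠ "" ∧ item ∉ out then out ++ [item] else out) res := by
  induction items with
  | nil => intro seen res hinv; simp
  | cons item t ih =>
    intro item_seen res hinv
    by_cases hne : item = ""
    · subst hne
      rw [List.filter_cons_of_neg (by simp)]
      rw [ih item_seen res hinv]
      simp [List.foldl_cons]
    · rw [List.filter_cons_of_pos (by simp [hne])]
      simp only [List.foldl_cons]
      by_cases hmem : item ∈ res
      · rw [if_pos ((hinv item).mpr hmem), if_neg (by simp [hmem])]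
        exact ih item_seen res hinv
      · rw [if_neg (fun hc => hmem ((hinv item).mp hc)), if_pos ⟨hne, hmem⟩]
        refine ih _ _ ?_
        intro x
        have hsx : x ∈ item_seen ↔ x ∈ res :=
          Iff.trans (Iff.symm (PySem.Set.contains_iff _ _)) (hinv x)
        simp [PySem.Set.mem_add, hsx]

theorem unique_eq (items : List String) :
    pyUniqueA (items.filter (fun item => item ≠ "")) = pyUniqueB items := by
  unfold pyUniqueA pyUniqueB
  exact unique_aux items PySem.Set.empty []
    (by intro x; simp [PySem.Set.empty])

-- ===== VERDICT (by name: the statement is the Claim_ definition above) =====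
theorem expand_pattern_py_spec : Claim_equal_expand_pattern_py := by
  intro pattern _
  unfold Spec_expand_pattern_py
  have h := main_lemma pattern.toList.length pattern.toList le_rfl [[]] []
  simp only at h
  simp only [expand_pattern_py, expand_pattern_py_alt, ← unique_eq, ← h]
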